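-- pv_equiv track=rewrite | github.com/ankitT20/AIQuerySystem | src/role_filter.py | _extract_common_words
-- ===== SOURCE A (Python) =====
-- from typing import List, Dict, Any, Optional
--
-- def _extract_common_words(comments: List[str]) -> List[str]:
--     """Extract common words from feedback comments"""
--     if not comments:
--         return []
--
--     word_count = {}
--     for comment in comments:
--         words = comment.lower().split()
--         for word in words:
--             # Filter out common words
--             if len(word) > 3 and word not in ['this', 'that', 'with', 'from', 'they', 'have', 'were', 'been', 'their']:
--                 word_count[word] = word_count.get(word, 0) + 1
--
--     # Sort by frequency
--     sorted_words = sorted(word_count.items(), key=lambda x: x[1], reverse=True)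
--     return [word for word, count in sorted_words]
-- ===== SOURCE B (Python) =====
-- from typing import List
--
-- _STOPWORDS = ('this', 'that', 'with', 'from', 'they', 'have', 'were', 'been', 'their')
--
-- def _extract_common_words(comments: List[str]) -> List[str]:
--     """Extract common words from feedback comments (bucket sort by frequency)."""
--     word_count = {}
--     for word in (w for comment in comments for w in comment.lower().split()
--                  if len(w) > 3 and w not in _STOPWORDS):
--         word_count[word] = word_count.get(word, 0) + 1
--
--     if not word_count:
--         return []
--
--     # Bucket words by count; dict insertion order keeps the stable tie-break.
--     buckets = {}
--     for word, count in word_count.items():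
--         buckets.setdefault(count, []).append(word)
--
--     result = []
--     for c in range(max(buckets), 0, -1):
--         result.extend(buckets.get(c, []))
--     return result
-- ===== Notes on version B (the rewrite author's own statement) =====
-- stated objective: alternative
-- what changed: Replaces the comparison sort of (word,count) pairs by a counting/bucket sort: words are bucketed by count in dict insertion order and buckets are emitted from the maximum count down to 1, reproducing the stable descending tie-break; the counting loop is a single flattened filtered pass instead of A's nested loops with an inline test.
import Mathlib
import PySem

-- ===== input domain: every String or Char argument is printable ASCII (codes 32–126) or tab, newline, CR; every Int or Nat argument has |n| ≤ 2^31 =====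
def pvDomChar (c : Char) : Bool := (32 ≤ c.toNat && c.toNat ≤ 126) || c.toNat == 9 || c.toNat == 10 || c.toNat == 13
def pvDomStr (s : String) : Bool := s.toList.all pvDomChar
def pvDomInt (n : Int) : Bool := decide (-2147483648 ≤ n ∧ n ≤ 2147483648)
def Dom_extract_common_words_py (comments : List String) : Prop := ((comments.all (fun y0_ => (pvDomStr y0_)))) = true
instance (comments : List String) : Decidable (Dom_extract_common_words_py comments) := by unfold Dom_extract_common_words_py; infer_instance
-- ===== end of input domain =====

-- B replaces A's comparison sort of (word,count) pairs by a counting/bucket sort over the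
-- counts (same stable tie-break proved below); alternative algorithm, no speed claim.

-- ===== PORT A =====
def extract_common_words_py (comments : List String) : List String :=
  if comments = [] then []
  else
    let word_count :=
      comments.foldl (fun wc comment =>
        (PySem.Str.split₀ (PySem.Str.lower comment)).foldl (fun wc word =>
          if 3 < PySem.Str.len word ∧
              word ∉ ["this", "that", "with", "from", "they", "have", "were", "been", "their"]
          then wc.insert word (wc.getD word 0 + 1) else wc) wc)
        (PySem.Dict.empty : PySem.Dict String Int)
    let sorted_words := PySem.List.sorted word_count.items (fun x => x.2) true
    sorted_words.map (fun p => p.1)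

-- ===== PORT B =====
def pvStopwords : List String := ["this", "that", "with", "from", "they", "have", "were", "been", "their"]

def extract_common_words_py_alt(comments : List String) : List String :=
  let word_count :=
    (comments.flatMap (fun comment =>
        (PySem.Str.split₀ (PySem.Str.lower comment)).filter
          (fun w => decide (3 < PySem.Str.len w ∧ w ∉ pvStopwords)))).foldl
      (fun wc word => wc.insert word (wc.getD word 0 + 1))
      (PySem.Dict.empty : PySem.Dict String Int)
  if word_count.items = [] then []
  else
    let buckets :=
      word_count.items.foldl (fun b p => b.modify p.2 [] (fun ws => ws ++ [p.1]))
        (PySem.Dict.empty : PySem.Dict Int (List String))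
    match PySem.List.max? buckets.keys (fun k => k) with
    | none => []
    | some maxc =>
        (PySem.List.pyRange maxc 0 (-1)).foldl (fun res c => res ++ buckets.getD c []) []

-- ===== PRECONDITION & SPEC =====
def Spec_extract_common_words_py (comments : List String) (out : List String) : Prop := out = extract_common_words_py_alt comments
instance (comments : List String) (out : List String) : Decidable (Spec_extract_common_words_py comments out) := by unfold Spec_extract_common_words_py; infer_instance

-- ===== CLAIM (what is proved, stated in full; the proofs are below) =====
def Claim_equal_extract_common_words_py : Prop := ∀ (comments : List String), Dom_extract_common_words_py comments → Spec_extract_common_words_py comments (extract_common_words_py comments)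

-- ===== LEMMAS AND PROOFS =====
theorem pv_insertBy_middle {α : Type} (before : α → α → Bool) (x : α)
    (hs ls : List α) (hh : ∀ y ∈ hs, before x y = false)
    (hl : ∀ y ∈ ls, before x y = true) :
    PySem.List.insertBy before x (hs ++ ls) = hs ++ x :: ls := by
  induction hs with
  | nil =>
    cases ls with
    | nil => simp [PySem.List.insertBy]
    | cons y ys => simp [PySem.List.insertBy, hl y (by simp)]
  | cons h t ih =>
    simp only [List.cons_append, PySem.List.insertBy, hh h (by simp)]
    simp only [Bool.false_eq_true, if_false]
    rw [ih (fun y hy => hh y (by simp [hy]))]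

theorem pv_sorted_rev_eq_buckets {α : Type} (key : α → Int) (l : List α) (ks : List Int)
    (hks : ks.Pairwise (· > ·)) (hcov : ∀ p ∈ l, key p ∈ ks) :
    PySem.List.sorted l key true =
      ks.flatMap (fun c => l.filter (fun p => key p == c)) := by
  induction l using List.reverseRecOn with
  | nil => simp [PySem.List.sorted]
  | append_singleton l x ih =>
    rw [PySem.List.sorted_rev_eq_foldl_insertBy, List.foldl_append,
        ← PySem.List.sorted_rev_eq_foldl_insertBy, List.foldl_cons, List.foldl_nil,
        ih (fun p hp => hcov p (by simp [hp]))]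
    -- split ks at key x
    have hx : key x ∈ ks := hcov x (by simp)
    obtain ⟨ks₁, ks₂, rfl⟩ := List.append_of_mem hx
    have hpa := List.pairwise_append.mp hks
    have h2 := List.pairwise_cons.mp hpa.2.1
    have h1 : ∀ c ∈ ks₁, key x < c := fun c hc => hpa.2.2 c hc (key x) (by simp)
    have h3 : ∀ c ∈ ks₂, c < key x := h2.1
    have hsplit : (ks₁ ++ key x :: ks₂).flatMap (fun c => l.filter (fun p => key p == c)) =
        (ks₁.flatMap (fun c => l.filter (fun p => key p == c)) ++ l.filter (fun p => key p == key x)) ++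
        ks₂.flatMap (fun c => l.filter (fun p => key p == c)) := by
      simp [List.flatMap_append]
    rw [hsplit, pv_insertBy_middle]
    · simp only [List.flatMap_append, List.flatMap_cons]
      simp only [List.filter_append, List.append_assoc]
      have e1 : ∀ c ∈ ks₁, List.filter (fun p => key p == c) l ++ List.filter (fun p => key p == c) [x]
          = List.filter (fun p => key p == c) l := by
        intro c hc
        have : ¬ (key x == c) = true := by simpa using (h1 c hc).ne
        simp [List.filter, this]
      have e2 : ∀ c ∈ ks₂, List.filter (fun p => key p == c) l ++ List.filter (fun p => key p == c) [x]
          = List.filter (fun p => key p == c) l := by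
        intro c hc
        have : ¬ (key x == c) = true := by simpa using (h3 c hc).ne'
        simp [List.filter, this]
      rw [List.flatMap_congr e1, List.flatMap_congr e2]
      simp [List.filter]
    · intro y hy
      simp only [List.mem_append] at hy
      rcases hy with hy | hy
      · obtain ⟨c, hc, hyc⟩ := List.mem_flatMap.mp hy
        have := (List.mem_filter.mp hyc).2
        have : key y = c := by simpa using this
        simp [this, not_lt.mpr (le_of_lt (h1 c hc))]
      · have := (List.mem_filter.mp hy).2
        have : key y = key x := by simpa using this
        simp [this]
    · intro y hy
      obtain ⟨c, hc, hyc⟩ := List.mem_flatMap.mp hy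
      have := (List.mem_filter.mp hyc).2
      have : key y = c := by simpa using this
      simp [this, h3 c hc]
theorem pv_pyRange_one_nil {a b : Int} (h : b ≤ a) : PySem.List.pyRange a b = [] := by
  have := PySem.List.length_pyRange_one a b
  have h2 : (b - a).toNat = 0 := by omega
  rw [h2] at this
  exact List.eq_nil_of_length_eq_zero this

theorem pv_pairwise_lt_pyRange_one (a b : Int) :
    (PySem.List.pyRange a b).Pairwise (· < ·) := by
  by_cases h : a < b
  · have : ((b - a).toNat) = (b - (a)).toNat := rfl
    induction hn : (b - a).toNat generalizing a with
    | zero => omega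
    | succ n ih =>
      rw [PySem.List.pyRange_one_cons h]
      refine List.Pairwise.cons (fun y hy => ?_) ?_
      · exact (PySem.List.mem_pyRange_one.mp hy).1.trans_lt' (by omega)
      · by_cases h2 : a + 1 < b
        · exact ih _ h2 rfl (by omega)
        · rw [pv_pyRange_one_nil (by omega)]; exact List.Pairwise.nil
  · rw [pv_pyRange_one_nil (by omega)]; exact List.Pairwise.nil

theorem pv_pairwise_gt_pyRange_neg_one (a b : Int) :
    (PySem.List.pyRange a b (-1)).Pairwise (· > ·) := by
  rw [PySem.List.pyRange_neg_one_eq_reverse, List.pairwise_reverse]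
  exact pv_pairwise_lt_pyRange_one _ _

def pvWords (comments : List String) : List String :=
  comments.flatMap (fun comment =>
    (PySem.Str.split₀ (PySem.Str.lower comment)).filter
      (fun w => decide (3 < PySem.Str.len w ∧ w ∉ pvStopwords)))

-- both counting loops build Counter(pvWords comments)
theorem pv_wcA_eq (comments : List String) :
    comments.foldl (fun wc comment =>
        (PySem.Str.split₀ (PySem.Str.lower comment)).foldl (fun wc word =>
          if 3 < PySem.Str.len word ∧
              word ∉ ["this", "that", "with", "from", "they", "have", "were", "been", "their"]
          then wc.insert word (wc.getD word 0 + 1) else wc) wc)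
        (PySem.Dict.empty : PySem.Dict String Int)
    = PySem.Dict.counter (pvWords comments) := by
  rw [← PySem.Dict.foldl_insert_getD_add_one_eq_counter, pvWords, List.foldl_flatMap]
  refine PySem.List.foldl_congr_mem' _ _ _ _ (fun c _ wc => ?_)
  rw [List.foldl_filter]
  refine PySem.List.foldl_congr_mem' _ _ _ _ (fun w _ wc => ?_)
  simp [pvStopwords]

theorem pv_wcB_eq (comments : List String) :
    (comments.flatMap (fun comment =>
        (PySem.Str.split₀ (PySem.Str.lower comment)).filter
          (fun w => decide (3 < PySem.Str.len w ∧ w ∉ pvStopwords)))).foldl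
      (fun wc word => wc.insert word (wc.getD word 0 + 1))
      (PySem.Dict.empty : PySem.Dict String Int) = PySem.Dict.counter (pvWords comments) :=
  PySem.Dict.foldl_insert_getD_add_one_eq_counter _

-- core: map-fst of the stable reverse sort equals B's bucket pass, for any items list
-- whose counts are all ≥ 1
theorem pv_core (l : List (String × Int)) (hnil : l ≠ []) (hlb : ∀ p ∈ l, 1 ≤ p.2) :
    (PySem.List.sorted l (fun x => x.2) true).map (fun p => p.1)
    = (match PySem.List.max?
          ((l.foldl (fun b p => b.modify p.2 [] (fun ws => ws ++ [p.1]))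
            (PySem.Dict.empty : PySem.Dict Int (List String))).keys) (fun k => k) with
      | none => []
      | some maxc =>
          (PySem.List.pyRange maxc 0 (-1)).foldl
            (fun res c => res ++ (l.foldl (fun b p => b.modify p.2 [] (fun ws => ws ++ [p.1]))
              (PySem.Dict.empty : PySem.Dict Int (List String))).getD c []) []) := by
  have hfold : (l.foldl (fun b p => b.modify p.2 [] (fun ws => ws ++ [p.1]))
        (PySem.Dict.empty : PySem.Dict Int (List String)))
      = ((l.map Prod.swap).foldl (fun b q => b.modify q.1 [] (fun ws => ws ++ [q.2]))
        (PySem.Dict.empty : PySem.Dict Int (List String))) :=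
    (List.foldl_map (f := Prod.swap)
      (g := fun (b : PySem.Dict Int (List String)) q => b.modify q.1 [] (fun ws => ws ++ [q.2]))
      (l := l) (init := PySem.Dict.empty)).symm
  have hbk : ∀ (cnt : Int),
      (l.foldl (fun b p => b.modify p.2 [] (fun ws => ws ++ [p.1]))
        (PySem.Dict.empty : PySem.Dict Int (List String))).getD cnt []
      = (l.filter (fun p => p.2 == cnt)).map (fun p => p.1) := by
    intro cnt
    rw [hfold, PySem.Dict.getD_foldl_modify_append]
    simp only [List.filter_map, List.map_map]
    rfl
  have hkeys : (l.foldl (fun b p => b.modify p.2 [] (fun ws => ws ++ [p.1]))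
        (PySem.Dict.empty : PySem.Dict Int (List String))).keys
      = PySem.Set.ofList (l.map (fun p => p.2)) := by
    rw [PySem.Dict.keys_foldl_modify_key l (fun p => p.2) [] (fun _ p => fun ws => ws ++ [p.1])]
    simp [PySem.Dict.empty, PySem.Set.update_nil_left]
  rw [hkeys]
  have hkeysne : PySem.Set.ofList (l.map (fun p => p.2)) ≠ [] := by
    obtain ⟨p, hp⟩ := List.exists_mem_of_ne_nil l hnil
    exact List.ne_nil_of_mem ((PySem.Set.mem_ofList _ _).mpr (List.mem_map_of_mem hp))
  obtain ⟨m, hm⟩ : ∃ m, PySem.List.max? (PySem.Set.ofList (l.map (fun p => p.2))) (fun k => k) = some m := by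
    cases hq : PySem.List.max? (PySem.Set.ofList (l.map (fun p => p.2))) (fun k => k) with
    | none => exact absurd ((PySem.List.max?_eq_none_iff _ _).mp hq) hkeysne
    | some m => exact ⟨m, rfl⟩
  simp only [hm]
  have hcov : ∀ p ∈ l, p.2 ∈ PySem.List.pyRange m 0 (-1) := by
    intro p hp
    have hub := PySem.List.max?_isMax hm p.2 ((PySem.Set.mem_ofList _ _).mpr (List.mem_map_of_mem hp))
    have := hlb p hp
    exact PySem.List.mem_pyRange_neg_one.mpr ⟨by omega, hub⟩
  rw [pv_sorted_rev_eq_buckets (fun p => p.2) l _ (pv_pairwise_gt_pyRange_neg_one m 0) hcov,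
      List.map_flatMap, PySem.List.foldl_append_eq_flatMap]
  simp only [List.nil_append]
  exact (List.flatMap_congr (fun c _ => (hbk c))).symm

theorem main_thm (comments : List String) :
    extract_common_words_py comments = extract_common_words_py_alt comments := by
  unfold extract_common_words_py extract_common_words_py_alt
  dsimp only
  rw [pv_wcA_eq, pv_wcB_eq comments]
  by_cases hc : comments = []
  · subst hc; simp [pvWords, PySem.Dict.counter, PySem.Dict.empty]
  · rw [if_neg hc]
    by_cases hnil : (PySem.Dict.counter (pvWords comments)).items = []
    · rw [if_pos hnil, hnil]
      simp [PySem.List.sorted_eq_nil_iff]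
    · rw [if_neg hnil]
      refine pv_core _ hnil ?_
      intro p hp
      rw [PySem.Dict.items_counter] at hp
      obtain ⟨k, hk, rfl⟩ := List.mem_map.mp hp
      have : k ∈ pvWords comments := (PySem.Set.mem_ofList _ _).mp hk
      have := List.count_pos_iff.mpr this
      simp only
      omega

-- ===== VERDICT (by name: the statement is the Claim_ definition above) =====
theorem extract_common_words_py_spec : Claim_equal_extract_common_words_py := by
  intro comments _
  show extract_common_words_py comments = extract_common_words_py_alt comments
  exact main_thm comments
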